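-- pv_equiv track=rewrite | github.com/fattyJake/text_tools | words.py | wordstartindex
-- ===== SOURCE A (Python) =====
-- def wordstartindex(text, index):
--     if index == None or not text[index].isalpha():
--         return None
--
--     # find start of previous word
--     while index >= 0 and text[index].isalpha():
--         index -= 1
--         if index == -1:
--             return 0
--         if not text[index].isalpha():
--             return index + 1
--     return None
-- ===== SOURCE B (Python) =====
-- def wordstartindex(text, index):
--     if index == None or not text[index].isalpha():
--         return None
--     # single forward pass: track the start of the current alphabetic run
--     start = None
--     for i in range(index + 1):
--         if text[i].isalpha():
--             if start is None:
--                 start = i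
--         else:
--             start = None
--     return start
-- ===== Notes on version B (the rewrite author's own statement) =====
-- stated objective: alternative
-- what changed: Replaces A's backward while-loop from the queried position with a single forward for-loop over range(index+1) that tracks the start of the current alphabetic run, resetting on each non-alpha character.
import Mathlib
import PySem

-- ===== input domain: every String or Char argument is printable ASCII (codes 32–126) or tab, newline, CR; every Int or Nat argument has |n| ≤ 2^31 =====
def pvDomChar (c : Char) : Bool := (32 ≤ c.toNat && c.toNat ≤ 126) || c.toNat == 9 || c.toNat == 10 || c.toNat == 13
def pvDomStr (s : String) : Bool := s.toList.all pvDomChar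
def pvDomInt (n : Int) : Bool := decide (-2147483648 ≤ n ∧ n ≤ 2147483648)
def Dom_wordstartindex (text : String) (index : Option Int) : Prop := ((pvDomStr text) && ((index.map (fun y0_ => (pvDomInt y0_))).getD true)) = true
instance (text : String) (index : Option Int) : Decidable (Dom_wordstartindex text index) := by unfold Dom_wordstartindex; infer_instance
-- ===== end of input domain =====

-- B replaces A's backward while-loop by one forward scan tracking the start of the current
-- alphabetic run (objective: alternative); return values agree wherever A returns.

-- ===== PORT A =====
-- the 'while index >= 0 and text[index].isalpha():' loop of A, step for step
def wordstartindexLoopA (cs : List Char) (i : Int) : Option Int :=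
  if h : 0 ≤ i ∧ ((PySem.List.pyGet? cs i).elim false PySem.Chars.isalpha) then
    -- index -= 1; if index == -1: return 0
    if h0 : i - 1 = -1 then some 0
    -- if not text[index].isalpha(): return index + 1
    else if ¬ ((PySem.List.pyGet? cs (i - 1)).elim false PySem.Chars.isalpha) then some i
    else wordstartindexLoopA cs (i - 1)
  else none
termination_by i.toNat
decreasing_by omega

def wordstartindex (text : String) (index : Option Int) : Option Int :=
  match index with
  | none => none
  | some i =>
    match PySem.Str.pyGet? text i with
    | none => none          -- Python raises IndexError here; excluded by Pre_
    | some c =>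
      if ¬ PySem.Chars.isalpha c then none
      else wordstartindexLoopA text.toList i

-- ===== PORT B =====
def wordstartindex_alt (text : String) (index : Option Int) : Option Int :=
  match index with
  | none => none
  | some idx =>
    match PySem.Str.pyGet? text idx with
    | none => none          -- Python raises IndexError here; excluded by Pre_
    | some c =>
      if ¬ PySem.Chars.isalpha c then none
      else
        (PySem.List.pyRange 0 (idx + 1) 1).foldl
          (fun start i =>
            if (PySem.List.pyGet? text.toList i).elim false PySem.Chars.isalpha then
              match start with
              | none => some i
              | some s => some s
            else none) none

-- ===== PRECONDITION & SPEC =====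
-- Pre_ excludes exactly the inputs where Python A raises IndexError: an index outside [-len, len).
def Pre_wordstartindex (text : String) (index : Option Int) : Prop :=
  match index with
  | none => True
  | some i => PySem.Raise.InRange text.toList.length i

instance (text : String) (index : Option Int) : Decidable (Pre_wordstartindex text index) := by
  unfold Pre_wordstartindex; cases index <;> infer_instance

def pvWitness_wordstartindex : String × Option Int := ("hello world", some 7)

def Spec_wordstartindex (text : String) (index : Option Int) (out : Option Int) : Prop := out = wordstartindex_alt text index
instance (text : String) (index : Option Int) (out : Option Int) : Decidable (Spec_wordstartindex text index out) := by unfold Spec_wordstartindex; infer_instance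

-- ===== CLAIM (what is proved, stated in full; the proofs are below) =====
def Claim_equal_wordstartindex : Prop := ∀ (text : String) (index : Option Int), Dom_wordstartindex text index → Pre_wordstartindex text index → Spec_wordstartindex text index (wordstartindex text index)

-- ===== LEMMAS AND PROOFS =====

-- start of the alphabetic run ending at position k (assuming cs[k] alphabetic)
def runStart (cs : List Char) : Nat → Nat
  | 0 => 0
  | k + 1 => if (cs[k]?.elim false PySem.Chars.isalpha) then runStart cs k else k + 1

theorem loopA_eq_runStart (cs : List Char) (k : Nat)
    (ha : cs[k]?.elim false PySem.Chars.isalpha = true) :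
    wordstartindexLoopA cs (k : Int) = some ((runStart cs k : Nat) : Int) := by
  induction k with
  | zero =>
      unfold wordstartindexLoopA
      simp [runStart, PySem.List.pyGet?_zero, ha]
  | succ k ih =>
      have hc1 : ((k + 1 : Nat) : Int) = (k : Int) + 1 := by push_cast; ring
      have hg1 : PySem.List.pyGet? cs ((k : Int) + 1) = cs[k + 1]? := by
        rw [← hc1, PySem.List.pyGet?_natCast]
      unfold wordstartindexLoopA
      rw [hc1]
      simp only [add_sub_cancel_right, hg1, PySem.List.pyGet?_natCast]
      rw [dif_pos ⟨by omega, by simpa using ha⟩, dif_neg (by omega : ¬((k : Int) = -1))]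
      by_cases hk : cs[k]?.elim false PySem.Chars.isalpha = true
      · rw [if_neg (by simp [hk]), ih hk]
        simp [runStart, hk]
      · simp only [Bool.not_eq_true] at hk
        rw [if_pos (by simp [hk])]
        simp [runStart, hk]

-- the state of B's fold after processing range(0, k)
def foldState (cs : List Char) : Nat → Option Int
  | 0 => none
  | k + 1 => if (cs[k]?.elim false PySem.Chars.isalpha) then some ((runStart cs k : Nat) : Int) else none

theorem fold_eq_foldState (cs : List Char) (k : Nat) :
    (PySem.List.pyRange 0 (k : Int) 1).foldl
      (fun start i =>
        if (PySem.List.pyGet? cs i).elim false PySem.Chars.isalpha then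
          match start with
          | none => some i
          | some s => some s
        else none) none = foldState cs k := by
  induction k with
  | zero => simp [PySem.List.pyRange_one_eq_nil, foldState]
  | succ k ih =>
      have hsplit : PySem.List.pyRange 0 ((k + 1 : Nat) : Int) 1
          = PySem.List.pyRange 0 (k : Int) 1 ++ [(k : Int)] := by
        have : ((k + 1 : Nat) : Int) = (k : Int) + 1 := by push_cast; ring
        rw [this, PySem.List.pyRange_one_succ_right (by omega)]
      rw [hsplit, List.foldl_append, ih]
      simp only [List.foldl_cons, List.foldl_nil, PySem.List.pyGet?_natCast]
      by_cases hk : cs[k]?.elim false PySem.Chars.isalpha = true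
      · cases k with
        | zero => simp [foldState, runStart, hk]
        | succ k' =>
            by_cases hk' : cs[k']?.elim false PySem.Chars.isalpha = true
            · simp [foldState, runStart, hk, hk']
            · simp only [Bool.not_eq_true] at hk'
              simp [foldState, runStart, hk, hk']
      · simp only [Bool.not_eq_true] at hk
        simp [foldState, hk]

-- ===== VERDICT (by name: the statement is the Claim_ definition above) =====
theorem wordstartindex_spec : Claim_equal_wordstartindex := by
  intro text index _hdom hpre
  unfold Spec_wordstartindex wordstartindex wordstartindex_alt
  cases index with
  | none => rfl
  | some i =>
    dsimp only
    cases hg : PySem.Str.pyGet? text i with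
    | none => rfl
    | some c =>
      dsimp only
      by_cases hc : PySem.Chars.isalpha c = true
      · rw [if_neg (by simp [hc]), if_neg (by simp [hc])]
        rcases Int.lt_or_le i 0 with hneg | hpos
        · -- negative in-range index: A's while-condition is false, B's range is empty
          unfold wordstartindexLoopA
          rw [dif_neg (by rintro ⟨h0, -⟩; omega)]
          rw [PySem.List.pyRange_one_eq_nil (by omega : i + 1 ≤ 0)]
          rfl
        · -- nonnegative index: both compute the start of the run containing i
          have hk : i = ((i.toNat : Nat) : Int) := by omega
          have hget : text.toList[i.toNat]? = some c := by
            rw [← PySem.List.pyGet?_natCast, ← hk]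
            simpa [PySem.Str.pyGet?] using hg
          have ha : text.toList[i.toNat]?.elim false PySem.Chars.isalpha = true := by
            rw [hget]; simpa using hc
          rw [hk, loopA_eq_runStart text.toList i.toNat ha]
          have h1 : ((i.toNat : Nat) : Int) + 1 = ((i.toNat + 1 : Nat) : Int) := by push_cast; ring
          rw [h1, fold_eq_foldState text.toList (i.toNat + 1)]
          simp [foldState, ha]
      · simp only [Bool.not_eq_true] at hc
        rw [if_pos (by simp [hc]), if_pos (by simp [hc])]
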